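-- pv_equiv track=rewrite | github.com/Tunnob-Vision/tunnel-vision | ml/src/equity.py | _straight_high
-- ===== SOURCE A (Python) =====
-- from typing import Iterable, List, Optional, Sequence, Tuple
--
-- def _straight_high(ranks: List[int]) -> int | None:
--     unique = sorted(set(ranks))
--     if 14 in unique:
--         unique.append(1)
--     unique = sorted(unique)
--     run = 1
--     best = None
--     for prev, curr in zip(unique, unique[1:]):
--         if curr - prev == 1:
--             run += 1
--             if run >= 5:
--                 best = curr
--         else:
--             run = 1
--     if best == 1:
--         return 5  # wheel straight
--     return best
-- ===== SOURCE B (Python) =====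
-- def _straight_high(ranks):
--     unique = sorted(set(ranks))
--     if 14 in unique:
--         unique = sorted(unique + [1])
--     for i in range(len(unique) - 1, 3, -1):
--         if all(unique[i - k] == unique[i] - k for k in range(1, 5)):
--             return 5 if unique[i] == 1 else unique[i]
--     return None
-- ===== Notes on version B (the rewrite author's own statement) =====
-- stated objective: alternative
-- what changed: B scans the sorted unique list backwards from the highest card and returns at the first index whose five-card window is consecutive, instead of A's forward run-length accumulator over adjacent pairs that keeps overwriting a best variable.
import Mathlib
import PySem

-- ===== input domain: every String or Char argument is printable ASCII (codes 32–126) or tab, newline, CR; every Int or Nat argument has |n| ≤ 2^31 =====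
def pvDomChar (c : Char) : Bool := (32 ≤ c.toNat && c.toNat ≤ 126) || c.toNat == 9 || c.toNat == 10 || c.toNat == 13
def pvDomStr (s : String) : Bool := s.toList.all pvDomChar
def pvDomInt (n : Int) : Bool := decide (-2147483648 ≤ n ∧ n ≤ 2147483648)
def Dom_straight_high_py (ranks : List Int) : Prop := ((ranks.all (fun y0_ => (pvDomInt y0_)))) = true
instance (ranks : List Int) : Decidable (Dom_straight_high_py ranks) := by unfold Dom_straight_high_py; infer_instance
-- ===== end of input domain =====

-- B replaces A's forward run-length scan (run counter + repeatedly overwritten best) by a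
-- backward index loop that returns at the first (hence highest) consecutive five-card window;
-- same asymptotic cost, genuinely different traversal (alternative).

-- ===== PORT A =====
def straight_high_py (ranks : List Int) : Option Int :=
  let unique1 := PySem.List.sorted (PySem.Set.ofList ranks) (fun x => x) false
  let unique2 := if (14 : Int) ∈ unique1 then unique1 ++ [1] else unique1
  let unique := PySem.List.sorted unique2 (fun x => x) false
  let rb := (unique.zip (PySem.List.slice unique (some 1) none)).foldl
      (fun (s : Int × Option Int) (pc : Int × Int) =>
        if pc.2 - pc.1 = 1 then (s.1 + 1, if 5 ≤ s.1 + 1 then some pc.2 else s.2)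
        else (1, s.2))
      (1, none)
  if rb.2 = some 1 then some 5 else rb.2

-- ===== PORT B =====
-- 'all(unique[i - k] == unique[i] - k for k in range(1, 5))' — every index i - k is in range
-- (the loop only visits 4 ≤ i < len), so both sides of '==' are ported through pyGet? exactly.
def pvAltWin (u : List Int) (i : Int) : Bool :=
  (PySem.List.pyRange 1 5 1).all fun k =>
    PySem.List.pyGet? u (i - k) == (PySem.List.pyGet? u i).map (fun v => v - k)

-- the 'for i in range(len(unique)-1, 3, -1)' loop with its early returns
def pvAltLoop (u : List Int) : List Int → Option Int
  | [] => none
  | i :: rest =>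
      if pvAltWin u i then
        match PySem.List.pyGet? u i with
        | some v => some (if v = 1 then 5 else v)
        | none => none
      else pvAltLoop u rest

def straight_high_py_alt (ranks : List Int) : Option Int :=
  let unique1 := PySem.List.sorted (PySem.Set.ofList ranks) (fun x => x) false
  let unique := if (14 : Int) ∈ unique1
    then PySem.List.sorted (unique1 ++ [1]) (fun x => x) false else unique1
  pvAltLoop unique (PySem.List.pyRange ((unique.length : Int) - 1) 3 (-1))

-- ===== PRECONDITION & SPEC =====
def Spec_straight_high_py (ranks : List Int) (out : Option Int) : Prop := out = straight_high_py_alt ranks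
instance (ranks : List Int) (out : Option Int) : Decidable (Spec_straight_high_py ranks out) := by unfold Spec_straight_high_py; infer_instance

-- ===== CLAIM (what is proved, stated in full; the proofs are below) =====
def Claim_equal_straight_high_py : Prop := ∀ (ranks : List Int), Dom_straight_high_py ranks → Spec_straight_high_py ranks (straight_high_py ranks)

-- ===== LEMMAS AND PROOFS =====

-- A's fold, as a structural recursion over (prev, run, best)
def pvScan : (Int × Int × Option Int) → List Int → (Int × Int × Option Int)
  | s, [] => s
  | (p, r, b), c :: t =>
      if c - p = 1 then pvScan (c, r + 1, if 5 ≤ r + 1 then some c else b) t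
      else pvScan (c, 1, b) t

lemma pvZipFold (l : List Int) : ∀ (p r : Int) (b : Option Int),
    ((p :: l).zip l).foldl
      (fun (s : Int × Option Int) (pc : Int × Int) =>
        if pc.2 - pc.1 = 1 then (s.1 + 1, if 5 ≤ s.1 + 1 then some pc.2 else s.2)
        else (1, s.2)) (r, b)
    = (pvScan (p, r, b) l).2 := by
  induction l with
  | nil => intro p r b; simp [pvScan]
  | cons c t ih =>
      intro p r b
      by_cases h : c - p = 1 <;> simp [pvScan, h, ih]

lemma pvScan_append (l₁ l₂ : List Int) : ∀ s, pvScan s (l₁ ++ l₂) = pvScan (pvScan s l₁) l₂ := by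
  induction l₁ with
  | nil => intro s; rfl
  | cons c t ih =>
      rintro ⟨p, r, b⟩
      by_cases h : c - p = 1 <;> simp [pvScan, h, ih]

-- run length of the leading consecutive (step -1) chain of a REVERSED prefix
def pvRunR : List Int → Int
  | [] => 0
  | [_] => 1
  | x :: y :: t => if x - y = 1 then pvRunR (y :: t) + 1 else 1

-- best straight top of a reversed prefix: first entry whose 5-window is consecutive
def pvBestR : List Int → Option Int
  | a :: b :: c :: d :: e :: t =>
      if a - b = 1 ∧ b - c = 1 ∧ c - d = 1 ∧ d - e = 1 then some a
      else pvBestR (b :: c :: d :: e :: t)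
  | _ => none

lemma pvRunR_pos (x : Int) (t : List Int) : 1 ≤ pvRunR (x :: t) := by
  induction t generalizing x with
  | nil => simp [pvRunR]
  | cons y t ih =>
      by_cases h : x - y = 1 <;> simp [pvRunR, h]
      have := ih y; omega

lemma pvRunR_ge_four (q : Int) (rest : List Int) :
    4 ≤ pvRunR (q :: rest) ↔
      ∃ b c d t, rest = b :: c :: d :: t ∧ q - b = 1 ∧ b - c = 1 ∧ c - d = 1 := by
  match rest with
  | [] => simp [pvRunR]
  | [b] => by_cases h : q - b = 1 <;> simp [pvRunR, h]
  | [b, c] =>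
      by_cases h1 : q - b = 1 <;> by_cases h2 : b - c = 1 <;> simp [pvRunR, h1, h2]
  | b :: c :: d :: t =>
      constructor
      · intro h
        refine ⟨b, c, d, t, rfl, ?_, ?_, ?_⟩ <;>
          (by_cases h1 : q - b = 1 <;> by_cases h2 : b - c = 1 <;> by_cases h3 : c - d = 1 <;>
            simp [pvRunR, h1, h2, h3] at h ⊢)
      · rintro ⟨b', c', d', t', he, h1, h2, h3⟩
        simp only [List.cons.injEq] at he
        obtain ⟨hb, hc, hd, ht⟩ := he
        subst hb; subst hc; subst hd; subst ht
        have := pvRunR_pos d t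
        simp [pvRunR, h1, h2, h3]
        omega

lemma pvBestR_cons (c q : Int) (rest : List Int) :
    pvBestR (c :: q :: rest) =
      if c - q = 1 ∧ 4 ≤ pvRunR (q :: rest) then some c else pvBestR (q :: rest) := by
  match rest with
  | [] => simp [pvBestR, pvRunR]
  | [b] => simp [pvBestR, pvRunR]; split_ifs <;> simp_all
  | [b, d] => simp [pvBestR, pvRunR]; split_ifs <;> simp_all
  | b :: d :: e :: t =>
      rw [show pvBestR (c :: q :: b :: d :: e :: t)
          = if c - q = 1 ∧ q - b = 1 ∧ b - d = 1 ∧ d - e = 1 then some c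
            else pvBestR (q :: b :: d :: e :: t) from rfl]
      congr 1
      rw [eq_iff_iff, pvRunR_ge_four]
      constructor
      · rintro ⟨h0, h1, h2, h3⟩; exact ⟨h0, b, d, e, t, rfl, h1, h2, h3⟩
      · rintro ⟨h0, b', c', d', t', he, h1, h2, h3⟩
        simp only [List.cons.injEq] at he
        obtain ⟨hb, hc, hd, ht⟩ := he
        subst hb; subst hc; subst hd; subst ht
        exact ⟨h0, h1, h2, h3⟩

-- invariant of A's scan: state = (last element, run of reversed prefix, best of reversed prefix)
lemma pvScan_inv (l : List Int) (p : Int) :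
    pvScan (p, 1, none) l
      = (((p :: l).reverse).headI, pvRunR ((p :: l).reverse), pvBestR ((p :: l).reverse)) := by
  induction l using List.reverseRecOn with
  | nil => simp [pvScan, pvRunR, pvBestR]
  | append_singleton l' c ih =>
      rw [show p :: (l' ++ [c]) = (p :: l') ++ [c] from rfl, pvScan_append, ih,
        List.reverse_append]
      obtain ⟨q, rest, hrv⟩ : ∃ q rest, (p :: l').reverse = q :: rest := by
        rcases hx : (p :: l').reverse with _ | ⟨q, rest⟩
        · exact absurd (congrArg List.length hx) (by simp)
        · exact ⟨q, rest, rfl⟩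
      rw [hrv]
      simp only [List.reverse_singleton, List.singleton_append, List.headI_cons]
      by_cases h : c - q = 1
      · rw [show pvScan (q, pvRunR (q :: rest), pvBestR (q :: rest)) [c]
            = (c, pvRunR (q :: rest) + 1,
                if 5 ≤ pvRunR (q :: rest) + 1 then some c else pvBestR (q :: rest)) from by
              simp [pvScan, h]]
        rw [pvBestR_cons c q rest]
        have hrunc : pvRunR (c :: q :: rest) = pvRunR (q :: rest) + 1 := by
          simp [pvRunR, h]
        simp only [hrunc, Prod.mk.injEq, true_and]
        by_cases h4 : 4 ≤ pvRunR (q :: rest)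
        · rw [if_pos (by omega), if_pos ⟨h, h4⟩]
        · rw [if_neg (by omega), if_neg (by tauto)]
      · rw [show pvScan (q, pvRunR (q :: rest), pvBestR (q :: rest)) [c]
            = (c, 1, pvBestR (q :: rest)) from by simp [pvScan, h]]
        rw [pvBestR_cons c q rest]
        simp [pvRunR, h]

-- A's result, pre-wheel, is pvBestR of the reversed unique list
lemma pvA_eq (u : List Int) :
    ((u.zip (PySem.List.slice u (some 1) none)).foldl
      (fun (s : Int × Option Int) (pc : Int × Int) =>
        if pc.2 - pc.1 = 1 then (s.1 + 1, if 5 ≤ s.1 + 1 then some pc.2 else s.2)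
        else (1, s.2)) (1, none)).2
    = pvBestR u.reverse := by
  rw [PySem.List.slice_from_one]
  cases u with
  | nil => simp [pvBestR]
  | cons p l =>
      rw [List.tail_cons, pvZipFold l p 1 none, pvScan_inv l p]

lemma pvBestR_short (l : List Int) (h : l.length ≤ 4) : pvBestR l = none := by
  match l with
  | [] | [_] | [_, _] | [_, _, _] | [_, _, _, _] => rfl
  | a :: b :: c :: d :: e :: t => exfalso; simp [List.length_cons] at h; omega

lemma pvRtakeSucc (u : List Int) (j : Nat) (h : j < u.length) :
    (u.take (j + 1)).reverse = u[j] :: (u.take j).reverse := by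
  rw [List.take_add_one, List.getElem?_eq_getElem h]
  simp

-- B's loop computes the wheel-mapped pvBestR of the reversed prefix
lemma pvLoop_eq (u : List Int) : ∀ (i : Nat), i < u.length →
    pvAltLoop u (PySem.List.pyRange (i : Int) 3 (-1))
      = (pvBestR ((u.take (i + 1)).reverse)).map (fun v => if v = 1 then 5 else v) := by
  intro i
  induction i using Nat.strong_induction_on with
  | _ i ih =>
    intro hi
    by_cases h4 : 4 ≤ i
    · obtain ⟨m, rfl⟩ : ∃ m, i = m + 4 := ⟨i - 4, by omega⟩
      have hm4 : m + 4 < u.length := hi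
      have hm3 : m + 3 < u.length := by omega
      have hm2 : m + 2 < u.length := by omega
      have hm1 : m + 1 < u.length := by omega
      have hm0 : m < u.length := by omega
      have e1 : ((m + 4 : Nat) : Int) - 1 = ((m + 3 : Nat) : Int) := by push_cast; ring
      have e2 : ((m + 4 : Nat) : Int) - 2 = ((m + 2 : Nat) : Int) := by push_cast; ring
      have e3 : ((m + 4 : Nat) : Int) - 3 = ((m + 1 : Nat) : Int) := by push_cast; ring
      have e4 : ((m + 4 : Nat) : Int) - 4 = ((m : Nat) : Int) := by push_cast; ring
      have g0 : PySem.List.pyGet? u ((m : Nat) : Int) = some u[m] := by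
        rw [PySem.List.pyGet?_natCast]; exact List.getElem?_eq_getElem hm0
      have g1 : PySem.List.pyGet? u ((m + 1 : Nat) : Int) = some u[m + 1] := by
        rw [PySem.List.pyGet?_natCast]; exact List.getElem?_eq_getElem hm1
      have g2 : PySem.List.pyGet? u ((m + 2 : Nat) : Int) = some u[m + 2] := by
        rw [PySem.List.pyGet?_natCast]; exact List.getElem?_eq_getElem hm2
      have g3 : PySem.List.pyGet? u ((m + 3 : Nat) : Int) = some u[m + 3] := by
        rw [PySem.List.pyGet?_natCast]; exact List.getElem?_eq_getElem hm3
      have g4 : PySem.List.pyGet? u ((m + 4 : Nat) : Int) = some u[m + 4] := by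
        rw [PySem.List.pyGet?_natCast]; exact List.getElem?_eq_getElem hm4
      have hwiff : pvAltWin u ((m + 4 : Nat) : Int) = true ↔
          (u[m + 3] = u[m + 4] - 1 ∧ u[m + 2] = u[m + 4] - 2 ∧
            u[m + 1] = u[m + 4] - 3 ∧ u[m] = u[m + 4] - 4) := by
        rw [pvAltWin, show PySem.List.pyRange 1 5 1 = [1, 2, 3, 4] from by decide]
        simp only [List.all_cons, List.all_nil, Bool.and_true, e1, e2, e3, e4,
          g0, g1, g2, g3, g4, Option.map_some]
        simp
      have h0 := pvRtakeSucc u (m + 4) hm4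
      have h1 := pvRtakeSucc u (m + 3) hm3
      have h2 := pvRtakeSucc u (m + 2) hm2
      have h3 := pvRtakeSucc u (m + 1) hm1
      have h4' := pvRtakeSucc u m hm0
      rw [show m + 3 + 1 = m + 4 from by omega] at h1
      rw [show m + 2 + 1 = m + 3 from by omega] at h2
      rw [show m + 1 + 1 = m + 2 from by omega] at h3
      rw [PySem.List.pyRange_neg_one_cons (by push_cast; omega : (3 : Int) < ((m + 4 : Nat) : Int)),
        e1]
      rw [show pvAltLoop u (((m + 4 : Nat) : Int) :: PySem.List.pyRange ((m + 3 : Nat) : Int) 3 (-1))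
          = if pvAltWin u ((m + 4 : Nat) : Int) then
              (match PySem.List.pyGet? u ((m + 4 : Nat) : Int) with
                | some v => some (if v = 1 then 5 else v)
                | none => none)
            else pvAltLoop u (PySem.List.pyRange ((m + 3 : Nat) : Int) 3 (-1)) from rfl]
      rw [h0, h1, h2, h3, h4']
      rw [show pvBestR (u[m + 4] :: u[m + 3] :: u[m + 2] :: u[m + 1] :: u[m] :: (u.take m).reverse)
          = if u[m + 4] - u[m + 3] = 1 ∧ u[m + 3] - u[m + 2] = 1 ∧ u[m + 2] - u[m + 1] = 1 ∧
              u[m + 1] - u[m] = 1 then some u[m + 4]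
            else pvBestR (u[m + 3] :: u[m + 2] :: u[m + 1] :: u[m] :: (u.take m).reverse) from rfl]
      by_cases hw : u[m + 3] = u[m + 4] - 1 ∧ u[m + 2] = u[m + 4] - 2 ∧
          u[m + 1] = u[m + 4] - 3 ∧ u[m] = u[m + 4] - 4
      · rw [if_pos (hwiff.mpr hw), if_pos (by obtain ⟨a, b, c, d⟩ := hw; omega), g4]
        rfl
      · rw [if_neg (fun hc => hw (hwiff.mp hc)),
          if_neg (by rintro ⟨a, b, c, d⟩; exact hw ⟨by omega, by omega, by omega, by omega⟩)]
        have := ih (m + 3) (by omega) hm3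
        rw [show m + 3 + 1 = m + 4 from by omega, h1, h2, h3, h4'] at this
        exact this
    · rw [PySem.List.pyRange_neg_one_eq_nil (by omega : (i : Int) ≤ 3)]
      rw [pvBestR_short _ (by rw [List.length_reverse, List.length_take]; omega)]
      rfl

lemma pvB_eq (u : List Int) :
    pvAltLoop u (PySem.List.pyRange ((u.length : Int) - 1) 3 (-1))
      = (pvBestR u.reverse).map (fun v => if v = 1 then 5 else v) := by
  cases u with
  | nil =>
      rw [show (([] : List Int).length : Int) - 1 = -1 from by simp,
        PySem.List.pyRange_neg_one_eq_nil (by norm_num)]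
      rfl
  | cons x t =>
      have hlen : 1 ≤ (x :: t).length := by simp
      have hc : (((x :: t).length : Int)) - 1 = (((x :: t).length - 1 : Nat) : Int) := by
        omega
      rw [hc, pvLoop_eq (x :: t) ((x :: t).length - 1) (by omega),
        show (x :: t).length - 1 + 1 = (x :: t).length from by omega, List.take_length]

-- ===== VERDICT (by name: the statement is the Claim_ definition above) =====
theorem straight_high_py_spec : Claim_equal_straight_high_py := by
  unfold Claim_equal_straight_high_py
  intro ranks _
  unfold Spec_straight_high_py straight_high_py straight_high_py_alt
  dsimp only
  set u1 := PySem.List.sorted (PySem.Set.ofList ranks) (fun x => x) false with hu1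
  have hue : PySem.List.sorted (if (14 : Int) ∈ u1 then u1 ++ [1] else u1) (fun x => x) false
      = (if (14 : Int) ∈ u1 then PySem.List.sorted (u1 ++ [1]) (fun x => x) false else u1) := by
    by_cases h14 : (14 : Int) ∈ u1
    · rw [if_pos h14, if_pos h14]
    · rw [if_neg h14, if_neg h14, hu1, PySem.List.sorted_sorted]
  rw [hue]
  set u := if (14 : Int) ∈ u1 then PySem.List.sorted (u1 ++ [1]) (fun x => x) false else u1
  rw [pvA_eq u, pvB_eq u]
  cases hb : pvBestR u.reverse with
  | none => simp
  | some v =>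
      by_cases hv : v = 1
      · subst hv; simp
      · simp [hv]
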